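-- pv_equiv track=rewrite | github.com/su-ram/Problem-Solving | 프로그래머스/라인_Q1.py | solution
-- ===== SOURCE A (Python) =====
-- from collections import deque
--
-- def solution(student, k):
--     ones = [i for i in range(len(student)) if student[i] == 1]
--     cnt = 0
--     que = deque(ones)
--     start = -1
--     length = len(student)
--     while len(que) >= k:
--         s = que[0]
--         e = que[k-1]
--         left = s - start
--         right = que[k] - e if len(que) > k else length - e
--         cnt += left * right
--         start = que.popleft()
--
--     return cnt
-- ===== SOURCE B (Python) =====
-- def solution(student, k):
--     # run-length pass: gaps[j] = distance between consecutive ones (with virtual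
--     # ones just before the list and at its end); answer = sum of gaps[i]*gaps[i+k]
--     gaps = [1]
--     for v in student:
--         if v == 1:
--             gaps.append(1)
--         else:
--             gaps[-1] += 1
--     return sum(gaps[i] * gaps[i + k] for i in range(len(gaps) - k))
-- ===== Notes on version B (the rewrite author's own statement) =====
-- stated objective: alternative
-- what changed: B never builds the list of one-positions or simulates a deque: a single run-length pass turns the list into the gap lengths between consecutive ones (with virtual sentinels), and the answer is the sum of products of gaps k apart.
import Mathlib
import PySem

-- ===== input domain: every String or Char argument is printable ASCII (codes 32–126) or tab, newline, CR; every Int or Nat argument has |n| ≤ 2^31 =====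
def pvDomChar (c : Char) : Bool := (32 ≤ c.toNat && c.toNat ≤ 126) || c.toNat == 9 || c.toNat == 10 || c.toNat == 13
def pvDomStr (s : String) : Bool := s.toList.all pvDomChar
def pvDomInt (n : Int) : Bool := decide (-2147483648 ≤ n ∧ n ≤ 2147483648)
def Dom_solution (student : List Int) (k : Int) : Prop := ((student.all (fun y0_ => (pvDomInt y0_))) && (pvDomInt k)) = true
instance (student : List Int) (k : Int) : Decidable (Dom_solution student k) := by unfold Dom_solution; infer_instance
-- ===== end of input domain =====

-- B replaces A's one-position list + deque/while simulation by a run-length pass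
-- (gap lengths between consecutive ones) and a sum of products of gaps k apart (alternative, same cost).

-- ===== PORT A =====
-- the while loop over the deque: que is popped from the front; start/cnt are the loop state
def solutionLoop (k length : Int) (cnt : Int) (que : List Int) (start : Int) : Int :=
  if k ≤ (que.length : Int) then
    match que with
    | [] => cnt  -- Python raises IndexError here (que[0] on an empty deque, only reachable when k ≤ 0); outside Pre_
    | s :: rest =>
        let e := (PySem.List.pyGet? (s :: rest) (k - 1)).getD 0  -- in range whenever Python does not raise
        let right := if k < ((s :: rest).length : Int) then (PySem.List.pyGet? (s :: rest) k).getD 0 - e else length - e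
        solutionLoop k length (cnt + (s - start) * right) rest s
  else cnt

def solution (student : List Int) (k : Int) : Int :=
  let ones := (PySem.List.pyRange 0 (student.length : Int) 1).filter (fun i => PySem.List.pyGet? student i == some 1)
  solutionLoop k (student.length : Int) 0 ones (-1)

-- ===== PORT B =====
def solution_alt (student : List Int) (k : Int) : Int :=
  let gaps := student.foldl
    (fun gaps v => if v = 1 then gaps ++ [1] else gaps.dropLast ++ [PySem.List.pyGetD gaps (-1) 0 + 1])  -- gaps[-1] += 1, functionally
    [1]
  (PySem.List.pyRange 0 ((gaps.length : Int) - k) 1).foldl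
    (fun acc i => acc + (PySem.List.pyGet? gaps i).getD 0 * (PySem.List.pyGet? gaps (i + k)).getD 0) 0  -- in range for every i in the range

-- ===== PRECONDITION & SPEC =====
-- Pre_ excludes exactly k ≤ 0, on which the Python A always raises IndexError (over-indexing / popping the deque empty).
def Pre_solution (student : List Int) (k : Int) : Prop := 1 ≤ k
instance (student : List Int) (k : Int) : Decidable (Pre_solution student k) := by unfold Pre_solution; infer_instance
def pvWitness_solution : List Int × Int := ([1, 0, 1, 1], 2)
def Spec_solution (student : List Int) (k : Int) (out : Int) : Prop := out = solution_alt student k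
instance (student : List Int) (k : Int) (out : Int) : Decidable (Spec_solution student k out) := by unfold Spec_solution; infer_instance

-- ===== CLAIM (what is proved, stated in full; the proofs are below) =====
def Claim_equal_solution : Prop := ∀ (student : List Int) (k : Int), Dom_solution student k → Pre_solution student k → Spec_solution student k (solution student k)

-- ===== LEMMAS AND PROOFS =====

-- positions of the ones of xs, offset by off
def onesPos : List Int → Int → List Int
  | [], _ => []
  | v :: t, off => if v = 1 then off :: onesPos t (off + 1) else onesPos t (off + 1)

-- (head, tail) of the list of gaps between consecutive ones (virtual ones at -1 and at the end)
def gapsSpec : List Int → Int × List Int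
  | [] => (1, [])
  | v :: t =>
      let g := gapsSpec t
      if v = 1 then (1, g.1 :: g.2) else (g.1 + 1, g.2)

-- adjacent differences of s :: q ++ [n]
def diffs : Int → List Int → Int → List Int
  | s, [], n => [n - s]
  | s, p :: q, n => (p - s) :: diffs p q n

-- sum over i of g[i] * g[i+k]
def sumShift (k : Nat) : List Int → Int
  | [] => 0
  | x :: g => ((x :: g)[k]?.elim 0 (fun y => x * y)) + sumShift k g

theorem diffs_length (q : List Int) : ∀ (s n : Int), (diffs s q n).length = q.length + 1 := by
  induction q with
  | nil => intro s n; simp [diffs]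
  | cons p q ih => intro s n; simp [diffs, ih]

theorem sumShift_zero (k : Nat) (g : List Int) (h : g.length ≤ k) : sumShift k g = 0 := by
  induction g with
  | nil => rfl
  | cons x g ih =>
      simp only [sumShift, List.getElem?_eq_none h, Option.elim]
      rw [ih (by simpa using Nat.le_of_succ_le h)]
      ring

theorem diffs_getElem (q : List Int) : ∀ (s n : Int) (j : Nat), j ≤ q.length →
    (diffs s q n)[j]? = some ((q ++ [n]).getD j 0 - (s :: q).getD j 0) := by
  induction q with
  | nil =>
      intro s n j hj
      obtain rfl : j = 0 := Nat.le_zero.mp (by simpa using hj)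
      simp [diffs]
  | cons p q ih =>
      intro s n j hj
      cases j with
      | zero => simp [diffs]
      | succ j =>
          simp only [diffs, List.getElem?_cons_succ, List.cons_append, List.getD, List.getElem?_cons_succ]
          exact ih p n j (by simpa using hj)

theorem solutionLoop_eq (k n : Int) (hk : 1 ≤ k) (que : List Int) : ∀ (cnt s : Int),
    solutionLoop k n cnt que s = cnt + sumShift k.toNat (diffs s que n) := by
  induction que with
  | nil =>
      intro cnt s
      rw [solutionLoop]
      rw [if_neg (by simp; omega)]
      rw [sumShift_zero _ _ (by simp [diffs_length]; omega)]
      ring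
  | cons p rest ih =>
      intro cnt s
      rw [solutionLoop]
      by_cases hle : k ≤ ((p :: rest).length : Int)
      · rw [if_pos hle]
        simp only []
        rw [ih]
        -- identify the term with the sumShift head
        have hkt : k.toNat - 1 ≤ rest.length := by
          simp at hle; omega
        have hd := diffs_getElem rest p n (k.toNat - 1) hkt
        have hhead : (diffs s (p :: rest) n)[k.toNat]? =
            some ((rest ++ [n]).getD (k.toNat - 1) 0 - (p :: rest).getD (k.toNat - 1) 0) := by
          have : diffs s (p :: rest) n = (p - s) :: diffs p rest n := rfl
          rw [this]
          have hk1 : k.toNat = (k.toNat - 1) + 1 := by omega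
          rw [hk1, List.getElem?_cons_succ, hd]
          simp
        -- e
        have he : (PySem.List.pyGet? (p :: rest) (k - 1)).getD 0 = (p :: rest).getD (k.toNat - 1) 0 := by
          rw [PySem.List.pyGet?_of_nonneg (p :: rest) (by omega)]
          have : (k - 1).toNat = k.toNat - 1 := by omega
          rw [this]
          rfl
        have hright : (if k < ((p :: rest).length : Int) then (PySem.List.pyGet? (p :: rest) k).getD 0 - (PySem.List.pyGet? (p :: rest) (k - 1)).getD 0 else n - (PySem.List.pyGet? (p :: rest) (k - 1)).getD 0)
            = (rest ++ [n]).getD (k.toNat - 1) 0 - (p :: rest).getD (k.toNat - 1) 0 := by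
          by_cases hlt : k < ((p :: rest).length : Int)
          · rw [if_pos hlt, he]
            congr 1
            rw [PySem.List.pyGet?_of_nonneg (p :: rest) (by omega)]
            have h2 : k.toNat - 1 < rest.length := by simp at hlt; omega
            have h3 : k.toNat = (k.toNat - 1) + 1 := by omega
            rw [List.getD_eq_getElem?_getD, List.getElem?_append_left h2, h3]
            rfl
          · rw [if_neg hlt, he]
            congr 1
            have h2 : k.toNat - 1 = rest.length := by simp at hle hlt; omega
            rw [List.getD_eq_getElem?_getD, h2, List.getElem?_append_right (le_refl _)]
            simp
        rw [hright]
        -- now assemble the sumShift equation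
        have : diffs s (p :: rest) n = (p - s) :: diffs p rest n := rfl
        rw [this, sumShift]
        rw [show ((p - s) :: diffs p rest n)[k.toNat]? = (diffs s (p::rest) n)[k.toNat]? from by rw [this]]
        rw [hhead]
        simp only [Option.elim]
        ring
      · rw [if_neg hle]
        rw [sumShift_zero _ _ (by simp [diffs_length] at hle ⊢; omega)]
        ring

theorem onesFilter_eq (xs : List Int) : ∀ (pre : List Int),
    (PySem.List.pyRange (pre.length : Int) (((pre ++ xs).length : Int)) 1).filter
        (fun i => PySem.List.pyGet? (pre ++ xs) i == some 1)
      = onesPos xs (pre.length : Int) := by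
  induction xs with
  | nil =>
      intro pre
      rw [PySem.List.pyRange_one_eq_nil (by simp)]
      simp [onesPos]
  | cons x t ih =>
      intro pre
      rw [PySem.List.pyRange_one_cons (by simp)]
      rw [List.filter_cons]
      have hhead : PySem.List.pyGet? (pre ++ x :: t) (pre.length : Int) = some x :=
        PySem.List.pyGet?_append_length pre t x
      have hlen1 : ((pre.length : Int) + 1) = (((pre ++ [x]).length : Int)) := by simp
      have hlen2 : (((pre ++ x :: t).length : Int)) = (((pre ++ [x]) ++ t).length : Int) := by simp
      have hassoc : pre ++ x :: t = (pre ++ [x]) ++ t := by simp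
      have htail : (PySem.List.pyRange ((pre.length : Int) + 1) (((pre ++ x :: t).length : Int)) 1).filter
            (fun i => PySem.List.pyGet? (pre ++ x :: t) i == some 1)
          = onesPos t ((pre.length : Int) + 1) := by
        rw [hlen1, hlen2, hassoc, ih (pre ++ [x])]
      by_cases hx : x = 1
      · subst hx
        simp only [hhead, htail, onesPos, beq_self_eq_true, if_pos]
      · have : (PySem.List.pyGet? (pre ++ x :: t) (pre.length : Int) == some 1) = false := by
          simp [hx]
        simp only [this, htail, onesPos, if_neg hx, Bool.false_eq_true, if_false]

theorem gapsFold_eq (xs : List Int) : ∀ (G : List Int) (c : Int),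
    xs.foldl (fun gaps v => if v = 1 then gaps ++ [1] else gaps.dropLast ++ [PySem.List.pyGetD gaps (-1) 0 + 1]) (G ++ [c])
      = G ++ (c - 1 + (gapsSpec xs).1) :: (gapsSpec xs).2 := by
  induction xs with
  | nil =>
      intro G c
      simp only [List.foldl_nil, gapsSpec]
      norm_num
  | cons v t ih =>
      intro G c
      by_cases hv : v = 1
      · subst hv
        simp only [List.foldl_cons, gapsSpec, ite_true]
        rw [ih (G ++ [c]) 1]
        simp
      · simp only [List.foldl_cons, if_neg hv, gapsSpec, List.dropLast_concat,
          PySem.List.pyGetD_neg_one_append_singleton]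
        rw [ih G (c + 1)]
        have : c + 1 - 1 + (gapsSpec t).1 = c - 1 + ((gapsSpec t).1 + 1) := by ring
        rw [this]

theorem diffs_shift (q : List Int) (s n h : Int) (tl : List Int) (hd : diffs s q n = h :: tl) :
    diffs (s - 1) q n = (h + 1) :: tl := by
  cases q with
  | nil => simp only [diffs, List.cons.injEq] at hd ⊢; constructor; omega; exact hd.2
  | cons p q => simp only [diffs, List.cons.injEq] at hd ⊢; exact ⟨by omega, hd.2⟩

theorem gapsSpec_eq_diffs (xs : List Int) : ∀ (off : Int),
    (gapsSpec xs).1 :: (gapsSpec xs).2 = diffs (off - 1) (onesPos xs off) (off + (xs.length : Int)) := by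
  induction xs with
  | nil =>
      intro off
      simp only [gapsSpec, onesPos, diffs, List.length_nil]
      norm_num
  | cons v t ih =>
      intro off
      have hlen : off + ((v :: t).length : Int) = (off + 1) + (t.length : Int) := by
        simp only [List.length_cons]; push_cast; ring
      by_cases hv : v = 1
      · subst hv
        simp only [gapsSpec, onesPos, diffs, hlen, ite_true]
        have h2 := ih (off + 1)
        simp only [add_sub_cancel_right] at h2
        rw [← h2]
        norm_num
      · simp only [gapsSpec, onesPos, if_neg hv, hlen]
        have h2 := ih (off + 1)
        have h3 := diffs_shift (onesPos t (off + 1)) (off + 1 - 1) ((off + 1) + (t.length : Int))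
          (gapsSpec t).1 (gapsSpec t).2 h2.symm
        have h4 : off + 1 - 1 - 1 = off - 1 := by omega
        rw [h4] at h3
        simp [h3]


theorem pyGet?_cons_shift (x : Int) (xs : List Int) (i : Int) (h : 0 ≤ i) :
    PySem.List.pyGet? (x :: xs) (i + 1) = PySem.List.pyGet? xs i := by
  rw [PySem.List.pyGet?_of_nonneg (x :: xs) (by omega), PySem.List.pyGet?_of_nonneg xs h]
  have : (i + 1).toNat = i.toNat + 1 := by omega
  rw [this, List.getElem?_cons_succ]

theorem map_pyRange_shift (f : Int → Int) (b : Int) :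
    (PySem.List.pyRange 1 (b + 1) 1).map f = (PySem.List.pyRange 0 b 1).map (fun i => f (i + 1)) := by
  rw [PySem.List.pyRange_one, PySem.List.pyRange_one]
  have hb : (b + 1 - 1).toNat = (b - 0).toNat := by omega
  rw [hb, List.map_map, List.map_map]
  apply List.map_congr_left
  intro j _
  simp only [Function.comp_apply]
  ring_nf

theorem portSum_eq (g : List Int) (k : Int) (hk : 1 ≤ k) :
    (PySem.List.pyRange 0 ((g.length : Int) - k) 1).foldl
        (fun acc i => acc + (PySem.List.pyGet? g i).getD 0 * (PySem.List.pyGet? g (i + k)).getD 0) 0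
      = sumShift k.toNat g := by
  induction g with
  | nil =>
      rw [PySem.List.pyRange_one_eq_nil (by simp; omega)]
      rfl
  | cons x t ih =>
      by_cases hle : ((x :: t).length : Int) ≤ k
      · rw [PySem.List.pyRange_one_eq_nil (by omega)]
        rw [sumShift_zero _ _ (by simp at hle ⊢; omega)]
        rfl
      · rw [not_le] at hle
        rw [PySem.List.foldl_add, PySem.List.pyRange_one_cons (by omega)]
        have hb : ((x :: t).length : Int) - k = ((t.length : Int) - k) + 1 := by simp; omega
        rw [List.map_cons, hb]
        simp only [zero_add]
        rw [map_pyRange_shift]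
        -- rewrite the shifted terms to refer to t
        have hcong : (PySem.List.pyRange 0 ((t.length : Int) - k) 1).map
              (fun i => (PySem.List.pyGet? (x :: t) (i + 1)).getD 0 * (PySem.List.pyGet? (x :: t) (i + 1 + k)).getD 0)
            = (PySem.List.pyRange 0 ((t.length : Int) - k) 1).map
              (fun i => (PySem.List.pyGet? t i).getD 0 * (PySem.List.pyGet? t (i + k)).getD 0) := by
          apply List.map_congr_left
          intro i hi
          have h0 : 0 ≤ i := by
            have := (PySem.List.mem_pyRange_one.mp hi).1
            omega
          rw [pyGet?_cons_shift x t i h0]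
          have : i + 1 + k = (i + k) + 1 := by ring
          rw [this, pyGet?_cons_shift x t (i + k) (by omega)]
        rw [hcong]
        -- head term
        have hhead : (PySem.List.pyGet? (x :: t) 0).getD 0 * (PySem.List.pyGet? (x :: t) k).getD 0
            = (x :: t)[k.toNat]?.elim 0 (fun y => x * y) := by
          have h1 : PySem.List.pyGet? (x :: t) 0 = some x := by
            rw [PySem.List.pyGet?_of_nonneg (x :: t) (by omega)]; rfl
          have h2 : PySem.List.pyGet? (x :: t) k = some ((x :: t)[k.toNat]) :=
            PySem.List.pyGet?_eq_some_getElem (x :: t) (by omega) (by simp; omega)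
          have h3 : (x :: t)[k.toNat]? = some ((x :: t)[k.toNat]) :=
            List.getElem?_eq_getElem (by simp; omega)
          rw [h1, h2, h3]
          simp
        -- IH : fold over t's range
        have ih2 : ((PySem.List.pyRange 0 ((t.length : Int) - k) 1).map
              (fun i => (PySem.List.pyGet? t i).getD 0 * (PySem.List.pyGet? t (i + k)).getD 0)).sum
            = sumShift k.toNat t := by
          have := ih
          rw [PySem.List.foldl_add] at this
          omega
        rw [List.sum_cons, hhead, ih2, sumShift]

-- ===== VERDICT (by name: the statement is the Claim_ definition above) =====
theorem solution_spec : Claim_equal_solution := by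
  intro student k _hdom hk
  have hk1 : 1 ≤ k := hk
  show solution student k = solution_alt student k
  have hones : (PySem.List.pyRange 0 (student.length : Int) 1).filter
        (fun i => PySem.List.pyGet? student i == some 1) = onesPos student 0 := by
    simpa using onesFilter_eq student []
  have hgaps : student.foldl
        (fun gaps v => if v = 1 then gaps ++ [1] else gaps.dropLast ++ [PySem.List.pyGetD gaps (-1) 0 + 1]) [1]
      = diffs (-1) (onesPos student 0) (student.length : Int) := by
    have h1 : student.foldl
          (fun gaps v => if v = 1 then gaps ++ [1] else gaps.dropLast ++ [PySem.List.pyGetD gaps (-1) 0 + 1]) [1]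
        = (gapsSpec student).1 :: (gapsSpec student).2 := by
      simpa using gapsFold_eq student [] 1
    have h2 : (gapsSpec student).1 :: (gapsSpec student).2
        = diffs (-1) (onesPos student 0) (student.length : Int) := by
      simpa using gapsSpec_eq_diffs student 0
    rw [h1, h2]
  have ha : solution student k = sumShift k.toNat (diffs (-1) (onesPos student 0) (student.length : Int)) := by
    unfold solution
    rw [hones]
    simpa using solutionLoop_eq k (student.length : Int) hk1 (onesPos student 0) 0 (-1)
  have hb : solution_alt student k = sumShift k.toNat (diffs (-1) (onesPos student 0) (student.length : Int)) := by
    unfold solution_alt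
    rw [hgaps]
    exact portSum_eq _ k hk1
  rw [ha, hb]
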